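-- pv_equiv track=rewrite | github.com/kvantik/hugo-kvantik | scripts/prepare_issue.py | slogan_quotes
-- ===== SOURCE A (Python) =====
-- def slogan_quotes(slogan):
--     slogan = list(slogan)
--     quotes = [i for i,c in enumerate(slogan) if c=='"']
--     for num, i in enumerate(quotes):
--         if num%2==0:
--             slogan[i] = "«"
--         else:
--             slogan[i] = "»"
--     return ''.join(slogan)
-- ===== SOURCE B (Python) =====
-- def slogan_quotes(slogan):
--     opening = True
--     out = []
--     for c in slogan:
--         if c == '"':
--             out.append('\u00ab' if opening else '\u00bb')
--             opening = not opening
--         else: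
--             out.append(c)
--     return ''.join(out)
-- ===== Notes on version B (the rewrite author's own statement) =====
-- stated objective: simpler
-- what changed: Single streaming pass with a boolean open/close toggle replaces A's two-pass scheme that materialises the list of quote indices and then mutates a char list by position.
import Mathlib
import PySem

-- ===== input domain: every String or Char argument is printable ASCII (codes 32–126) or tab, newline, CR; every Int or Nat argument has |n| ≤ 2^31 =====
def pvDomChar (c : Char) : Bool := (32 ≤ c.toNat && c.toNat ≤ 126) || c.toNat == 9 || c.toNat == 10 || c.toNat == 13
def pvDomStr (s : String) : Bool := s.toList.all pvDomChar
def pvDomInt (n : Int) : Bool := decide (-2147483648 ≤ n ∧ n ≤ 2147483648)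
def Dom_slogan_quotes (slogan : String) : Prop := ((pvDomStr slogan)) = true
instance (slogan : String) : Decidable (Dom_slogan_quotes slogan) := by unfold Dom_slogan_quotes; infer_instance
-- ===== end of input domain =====

-- B replaces A's two passes (index table + positional mutation) with one streaming pass and a boolean toggle; objective: simpler.

-- ===== PORT A =====
-- [i for i,c in enumerate(slogan) if c=='"'] (counter i carried explicitly)
def pvQuoteIdxs : Nat → List Char → List Nat
  | _, [] => []
  | i, c :: cs => if c == '"' then i :: pvQuoteIdxs (i + 1) cs else pvQuoteIdxs (i + 1) cs

-- for num, i in enumerate(quotes): slogan[i] = «/» by parity of num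
def pvLoopA : Nat → List Char → List Nat → List Char
  | _, l, [] => l
  | num, l, i :: rest =>
      pvLoopA (num + 1) (l.set i (if num % 2 == 0 then '«' else '»')) rest

def slogan_quotes (slogan : String) : String :=
  let cs := slogan.toList
  let quotes := pvQuoteIdxs 0 cs
  String.mk (pvLoopA 0 cs quotes)

-- ===== PORT B =====
def slogan_quotes_alt (slogan : String) : String :=
  String.mk ((slogan.toList.foldl
    (fun st c =>
      if c == '"' then (st.1 ++ [if st.2 then '«' else '»'], !st.2)
      else (st.1 ++ [c], st.2))
    ([], true)).1)

-- ===== PRECONDITION & SPEC =====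
def Spec_slogan_quotes (slogan : String) (out : String) : Prop := out = slogan_quotes_alt slogan
instance (slogan : String) (out : String) : Decidable (Spec_slogan_quotes slogan out) := by unfold Spec_slogan_quotes; infer_instance

-- ===== CLAIM (what is proved, stated in full; the proofs are below) =====
def Claim_equal_slogan_quotes : Prop := ∀ (slogan : String), Dom_slogan_quotes slogan → Spec_slogan_quotes slogan (slogan_quotes slogan)

-- ===== LEMMAS AND PROOFS =====

-- common recursive characterisation: paint quotes with alternation driven by the counter num
def pvPaint : Nat → List Char → List Char
  | _, [] => []
  | num, c :: cs =>
      if c == '"' then (if num % 2 == 0 then '«' else '»') :: pvPaint (num + 1) cs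
      else c :: pvPaint num cs

theorem pvQuoteIdxs_shift (cs : List Char) (k : Nat) :
    pvQuoteIdxs k cs = (pvQuoteIdxs 0 cs).map (· + k) := by
  induction cs generalizing k with
  | nil => simp [pvQuoteIdxs]
  | cons c cs ih =>
    simp only [pvQuoteIdxs]
    by_cases h : c == '"'
    · rw [if_pos h, if_pos h, ih (k + 1), ih 1, List.map_cons, List.map_map]
      congr 1
      · omega
      · apply List.map_congr_left; intro a _; simp only [Function.comp_apply]; omega
    · rw [if_neg h, if_neg h, ih (k + 1), ih 1, List.map_map]
      apply List.map_congr_left; intro a _; simp only [Function.comp_apply]; omega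

theorem pvLoopA_shift (qs : List Nat) (num : Nat) (c : Char) (l : List Char) :
    pvLoopA num (c :: l) (qs.map (· + 1)) = c :: pvLoopA num l qs := by
  induction qs generalizing num l with
  | nil => simp [pvLoopA]
  | cons q qs ih => simp [pvLoopA, List.set, ih]

theorem pvLoopA_eq_paint (cs : List Char) (num : Nat) :
    pvLoopA num cs (pvQuoteIdxs 0 cs) = pvPaint num cs := by
  induction cs generalizing num with
  | nil => simp [pvLoopA, pvQuoteIdxs, pvPaint]
  | cons c cs ih =>
    simp only [pvQuoteIdxs, pvPaint]
    by_cases h : c == '"'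
    · rw [if_pos h, if_pos h, pvQuoteIdxs_shift cs 1]
      simp only [pvLoopA, List.set]
      rw [pvLoopA_shift, ih]
    · rw [if_neg h, if_neg h, pvQuoteIdxs_shift cs 1, pvLoopA_shift, ih]

theorem pvFoldB_eq_paint (cs : List Char) (acc : List Char) (num : Nat) :
    (cs.foldl
      (fun st c =>
        if c == '"' then (st.1 ++ [if st.2 then '«' else '»'], !st.2)
        else (st.1 ++ [c], st.2))
      (acc, num % 2 == 0)).1 = acc ++ pvPaint num cs := by
  induction cs generalizing acc num with
  | nil => simp [pvPaint]
  | cons c cs ih =>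
    simp only [List.foldl, pvPaint]
    by_cases h : c == '"'
    · rw [if_pos h, if_pos h]
      have hb : (!(num % 2 == 0)) = ((num + 1) % 2 == 0) := by
        rcases Nat.even_or_odd num with he | ho
        · have : num % 2 = 0 := Nat.even_iff.mp he
          have : (num + 1) % 2 = 1 := by omega
          simp_all
        · have : num % 2 = 1 := Nat.odd_iff.mp ho
          have : (num + 1) % 2 = 0 := by omega
          simp_all
      rw [hb, ih]
      simp
    · rw [if_neg h, if_neg h, ih]
      simp

-- ===== VERDICT (by name: the statement is the Claim_ definition above) =====
theorem slogan_quotes_spec : Claim_equal_slogan_quotes := by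
  intro s _
  unfold Spec_slogan_quotes slogan_quotes slogan_quotes_alt
  show String.mk (pvLoopA 0 s.toList (pvQuoteIdxs 0 s.toList)) = _
  rw [pvLoopA_eq_paint]
  have := pvFoldB_eq_paint s.toList [] 0
  simp only [Nat.zero_mod, beq_self_eq_true] at this
  rw [this]
  simp
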